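-- pv_equiv track=rewrite | github.com/KhushalSharmaTheDevloper/Flask-Website-FILE-READER- | app.py | extract_rack_number
-- ===== SOURCE A (Python) =====
-- def extract_rack_number(contents):
--     rack_numbers = {}
--     current_rack = None
--
--     for line in contents:
--         line = line.strip()
--         if line.startswith("Rec No."):
--             current_rack = line.split('-')[-1].strip()
--         elif line.startswith("S.No.") or line.startswith("Name of The Chemical Compound"):
--             continue
--         elif current_rack and line:
--             if current_rack not in rack_numbers:
--                 rack_numbers[current_rack] = []
--             rack_numbers[current_rack].append(line)
--
--     return rack_numbers
-- ===== SOURCE B (Python) =====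
-- def extract_rack_number(contents):
--     lines = [line.strip() for line in contents]
--     headers = [i for i, line in enumerate(lines) if line.startswith("Rec No.")]
--     bounds = headers[1:] + [len(lines)]
--     result = {}
--     for h, e in zip(headers, bounds):
--         key = lines[h].split('-')[-1].strip()
--         body = [line for line in lines[h + 1:e]
--                 if line and not line.startswith("S.No.")
--                 and not line.startswith("Name of The Chemical Compound")]
--         if key and body:
--             if key in result:
--                 result[key].extend(body)
--             else:
--                 result[key] = body
--     return result
-- ===== Notes on version B (the rewrite author's own statement) =====
-- stated objective: alternative
-- what changed: A is a single stateful pass that tracks the current rack while appending line by line; B first strips all lines, locates all 'Rec No.' header positions via enumerate, slices the input into header-delimited segments, filters each segment's valid lines in bulk, and merges each segment's body into the dict in one extend.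
import Mathlib
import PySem

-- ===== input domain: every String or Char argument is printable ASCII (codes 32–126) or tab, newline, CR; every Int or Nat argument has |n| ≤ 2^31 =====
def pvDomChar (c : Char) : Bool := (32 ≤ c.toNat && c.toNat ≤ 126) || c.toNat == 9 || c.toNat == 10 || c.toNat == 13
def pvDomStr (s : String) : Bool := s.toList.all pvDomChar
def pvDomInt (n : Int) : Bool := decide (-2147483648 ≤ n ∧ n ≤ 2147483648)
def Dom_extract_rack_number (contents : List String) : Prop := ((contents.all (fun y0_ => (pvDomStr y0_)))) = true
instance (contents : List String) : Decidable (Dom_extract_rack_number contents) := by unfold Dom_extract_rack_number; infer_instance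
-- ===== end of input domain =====

-- B re-groups the lines by first locating all header positions and slicing the input into
-- header-delimited segments (a different decomposition of the same task; no speed claim).
-- Shared helpers: the literal sub-expressions both Pythons contain.
-- pvHdr l = l.startswith("Rec No.")
def pvHdr (l : String) : Bool := PySem.Str.startswith l "Rec No."
-- pvKeyOf l = l.split('-')[-1].strip()   (the separator "-" is non-empty so split? is `some`,
-- and Python's split always yields a non-empty list, so [-1] is its last element)
def pvKeyOf (l : String) : String :=
  PySem.Str.strip (PySem.List.pyGetD ((PySem.Str.split? l "-").getD []) (-1) "")
-- pvSkip l = l.startswith("S.No.") or l.startswith("Name of The Chemical Compound")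
def pvSkip (l : String) : Bool :=
  PySem.Str.startswith l "S.No." || PySem.Str.startswith l "Name of The Chemical Compound"
-- pvValid l = l and not l.startswith("S.No.") and not l.startswith("Name of The Chemical Compound")
def pvValid (l : String) : Bool :=
  (!(l == "")) && (!PySem.Str.startswith l "S.No.") && (!PySem.Str.startswith l "Name of The Chemical Compound")

-- ===== PORT A =====
-- the body of A's 'for line in contents' loop, acting on the already-stripped line
def pvStepA (st : PySem.Dict String (List String) × Option String) (line : String) :
    PySem.Dict String (List String) × Option String :=
  if pvHdr line then
    (st.1, some (pvKeyOf line))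
  else if pvSkip line then
    st
  else
    match st.2 with
    | none => st
    | some k =>
      if k ≠ "" ∧ line ≠ "" then
        let d := if st.1.contains k = false then st.1.insert k [] else st.1
        (d.insert k (d.getD k [] ++ [line]), st.2)
      else st

def extract_rack_number (contents : List String) : List (String × List String) :=
  (contents.foldl (fun st raw => pvStepA st (PySem.Str.strip raw))
    ((PySem.Dict.empty : PySem.Dict String (List String)), (none : Option String))).1.items

-- ===== PORT B =====
-- the body of B's 'for h, e in zip(headers, bounds)' loop over the full stripped list ys
def pvStepB (ys : List String) (d : PySem.Dict String (List String)) (p : Int × Int) :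
    PySem.Dict String (List String) :=
  let key := pvKeyOf (PySem.List.pyGetD ys p.1 "")
  let body := (PySem.List.slice ys (some (p.1 + 1)) (some p.2)).filter pvValid
  if key ≠ "" ∧ body ≠ [] then
    if d.contains key then d.insert key (d.getD key [] ++ body) else d.insert key body
  else d

def extract_rack_number_alt (contents : List String) : List (String × List String) :=
  let lines := contents.map PySem.Str.strip
  let headers := ((PySem.List.enumerate lines).filter (fun p => pvHdr p.2)).map (fun p => p.1)
  let bounds := headers.tail ++ [(lines.length : Int)]
  ((headers.zip bounds).foldl (pvStepB lines)
    (PySem.Dict.empty : PySem.Dict String (List String))).items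

-- ===== PRECONDITION & SPEC =====
def Spec_extract_rack_number (contents : List String) (out : List (String × List String)) : Prop := out = extract_rack_number_alt contents
instance (contents : List String) (out : List (String × List String)) : Decidable (Spec_extract_rack_number contents out) := by unfold Spec_extract_rack_number; infer_instance

-- ===== CLAIM (what is proved, stated in full; the proofs are below) =====
def Claim_equal_extract_rack_number : Prop := ∀ (contents : List String), Dom_extract_rack_number contents → Spec_extract_rack_number contents (extract_rack_number contents)

-- ===== LEMMAS AND PROOFS =====

-- "not a header": the predicate the segment decomposition splits on
def pvNH (l : String) : Bool := !pvHdr l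

-- one append of A's inner 'rack_numbers[current_rack].append(line)' (with the lazy [] insert)
def pvExt1 (d : PySem.Dict String (List String)) (k : String) (l : String) :
    PySem.Dict String (List String) :=
  let d' := if d.contains k = false then d.insert k [] else d
  d'.insert k (d'.getD k [] ++ [l])

-- B's per-segment update (also the net effect of A over one segment)
def pvApply (d : PySem.Dict String (List String)) (k : String) (body : List String) :
    PySem.Dict String (List String) :=
  if k ≠ "" ∧ body ≠ [] then
    if d.contains k then d.insert k (d.getD k [] ++ body) else d.insert k body
  else d

-- reference segment recursion both ports are reduced to
def pvSegRun (d : PySem.Dict String (List String)) (zs : List String) :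
    PySem.Dict String (List String) :=
  match hr : zs.dropWhile pvNH with
  | [] => d
  | h :: r =>
      pvSegRun (pvApply d (pvKeyOf h) ((r.takeWhile pvNH).filter pvValid)) (r.dropWhile pvNH)
termination_by zs.length
decreasing_by
  have h1 : (zs.dropWhile pvNH).length ≤ zs.length := List.length_dropWhile_le ..
  rw [hr] at h1
  have h2 : (r.dropWhile pvNH).length ≤ r.length := List.length_dropWhile_le ..
  simp at h1; omega

lemma pvSegRun_nil (d : PySem.Dict String (List String)) (zs : List String)
    (h : zs.dropWhile pvNH = []) : pvSegRun d zs = d := by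
  rw [pvSegRun]
  split
  · rfl
  · rename_i h0 r hr
    rw [h] at hr; cases hr

lemma pvSegRun_cons (d : PySem.Dict String (List String)) (zs : List String)
    (h0 : String) (r : List String) (h : zs.dropWhile pvNH = h0 :: r) :
    pvSegRun d zs =
      pvSegRun (pvApply d (pvKeyOf h0) ((r.takeWhile pvNH).filter pvValid)) (r.dropWhile pvNH) := by
  rw [pvSegRun]
  split
  · rename_i hr
    rw [h] at hr; cases hr
  · rename_i h1 r1 hr
    rw [h] at hr
    cases hr
    rfl

lemma pv_head_dropWhile (zs : List String) (h0 : String) (r : List String)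
    (h : zs.dropWhile pvNH = h0 :: r) : pvHdr h0 = true := by
  induction zs with
  | nil => simp at h
  | cons a l ih =>
    rw [List.dropWhile_cons] at h
    split at h
    · exact ih h
    · next hp => cases h; simpa [pvNH] using hp

-- appending line after line at key k equals one bulk segment append
lemma pvFoldExt (k : String) : ∀ (body : List String) (d : PySem.Dict String (List String)),
    body.foldl (fun d l => pvExt1 d k l) d =
      if body = [] then d
      else if d.contains k then d.insert k (d.getD k [] ++ body) else d.insert k body := by
  intro body
  induction body with
  | nil => intro d; simp
  | cons l t ih =>
    intro d
    rw [List.foldl_cons, ih]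
    by_cases hc : d.contains k
    · have he : pvExt1 d k l = d.insert k (d.getD k [] ++ [l]) := by
        simp [pvExt1, hc]
      rw [he]
      cases t with
      | nil => simp [hc]
      | cons x xs =>
        simp only [List.cons_ne_nil, if_false, PySem.Dict.contains_insert_self, if_true,
          PySem.Dict.getD_insert_self, PySem.Dict.insert_insert_self, hc]
        simp
    · have hc' : d.contains k = false := by simpa using hc
      have he : pvExt1 d k l = d.insert k [l] := by
        simp [pvExt1, hc', PySem.Dict.getD_insert_self, PySem.Dict.insert_insert_self]
      rw [he]
      cases t with
      | nil => simp [hc']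
      | cons x xs =>
        simp only [List.cons_ne_nil, if_false, PySem.Dict.contains_insert_self, if_true,
          PySem.Dict.getD_insert_self, PySem.Dict.insert_insert_self, hc']
        simp

-- with no current rack, non-header lines are ignored
lemma pvFold_none (zs : List String) (d : PySem.Dict String (List String))
    (h : ∀ l ∈ zs, pvHdr l = false) :
    zs.foldl pvStepA (d, none) = (d, none) := by
  induction zs with
  | nil => rfl
  | cons l t ih =>
    have hl : pvHdr l = false := h l List.mem_cons_self
    have hstep : pvStepA (d, none) l = (d, none) := by
      simp only [pvStepA, hl, Bool.false_eq_true, if_false]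
      split <;> rfl
    rw [List.foldl_cons, hstep]
    exact ih (fun x hx => h x (List.mem_cons_of_mem _ hx))

-- with current rack k, a header-free block contributes exactly pvApply of its valid lines
lemma pvFold_some : ∀ (zs : List String) (d : PySem.Dict String (List String)) (k : String),
    (∀ l ∈ zs, pvHdr l = false) →
    zs.foldl pvStepA (d, some k) = (pvApply d k (zs.filter pvValid), some k) := by
  have raw : ∀ (zs : List String) (d : PySem.Dict String (List String)) (k : String),
      (∀ l ∈ zs, pvHdr l = false) →
      zs.foldl pvStepA (d, some k) =
        ((if k = "" then d else (zs.filter pvValid).foldl (fun d l => pvExt1 d k l) d), some k) := by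
    intro zs
    induction zs with
    | nil => intro d k _; simp
    | cons l t ih =>
      intro d k h
      have hl : pvHdr l = false := h l List.mem_cons_self
      have ht : ∀ x ∈ t, pvHdr x = false := fun x hx => h x (List.mem_cons_of_mem _ hx)
      by_cases hk : k = ""
      · have hstep : pvStepA (d, some k) l = (d, some k) := by
          simp only [pvStepA, hl, Bool.false_eq_true, if_false]
          split
          · rfl
          · simp [hk]
        rw [List.foldl_cons, hstep, ih d k ht]
        simp [hk]
      · by_cases hsk : pvSkip l = true
        · have hv : pvValid l = false := by
            unfold pvSkip at hsk
            rw [Bool.or_eq_true] at hsk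
            unfold pvValid
            rcases hsk with hsk | hsk <;> rw [hsk] <;>
              simp only [Bool.not_true, Bool.and_false, Bool.false_and]
          have hstep : pvStepA (d, some k) l = (d, some k) := by
            simp [pvStepA, hl, hsk]
          rw [List.foldl_cons, hstep, ih d k ht]
          simp [hk, hv]
        · have hsk' : pvSkip l = false := by simpa using hsk
          by_cases hle : l = ""
          · have hv : pvValid l = false := by
              unfold pvValid
              rw [show (l == "") = true from by simp [hle]]
              simp only [Bool.not_true, Bool.false_and]
            have hstep : pvStepA (d, some k) l = (d, some k) := by
              subst hle
              simp [pvStepA, show pvHdr "" = false from by decide,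
                show pvSkip "" = false from by decide]
            rw [List.foldl_cons, hstep, ih d k ht]
            simp [hk, hv]
          · have hv : pvValid l = true := by
              have h2 := hsk'
              unfold pvSkip at h2
              rw [Bool.or_eq_false_iff] at h2
              have h3 : (l == "") = false := by simpa using hle
              unfold pvValid
              rw [h2.1, h2.2, h3]
              rfl
            have hstep : pvStepA (d, some k) l = (pvExt1 d k l, some k) := by
              simp [pvStepA, hl, hsk', hk, hle, pvExt1]
            rw [List.foldl_cons, hstep, ih _ k ht]
            simp [hk, hv]
  intro zs d k h
  rw [raw zs d k h, pvFoldExt]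
  by_cases hk : k = ""
  · simp [pvApply, hk]
  · by_cases hb : zs.filter pvValid = []
    · simp [pvApply, hk, hb]
    · simp [pvApply, hk, hb]

lemma pvMain_some : ∀ (n : Nat) (zs : List String) (d : PySem.Dict String (List String)) (k : String),
    zs.length ≤ n →
    (zs.foldl pvStepA (d, some k)).1 =
      pvSegRun (pvApply d k ((zs.takeWhile pvNH).filter pvValid)) (zs.dropWhile pvNH) := by
  intro n
  induction n with
  | zero =>
    intro zs d k hn
    have hz : zs = [] := List.eq_nil_of_length_eq_zero (Nat.le_zero.mp hn)
    subst hz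
    simp [pvApply, pvSegRun_nil]
  | succ n ih =>
    intro zs d k hn
    have hsplit : zs.takeWhile pvNH ++ zs.dropWhile pvNH = zs := List.takeWhile_append_dropWhile
    have hpre' : ∀ l ∈ zs.takeWhile pvNH, pvHdr l = false := by
      intro l hlm
      have := List.mem_takeWhile_imp hlm
      simpa [pvNH] using this
    cases hdw : zs.dropWhile pvNH with
    | nil =>
      conv_lhs => rw [← hsplit, hdw]
      rw [List.append_nil, pvFold_some _ d k hpre']
      exact (pvSegRun_nil _ _ rfl).symm
    | cons h0 r =>
      have hh : pvHdr h0 = true := pv_head_dropWhile zs h0 r hdw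
      have hlen : r.length ≤ n := by
        have h1 : (zs.dropWhile pvNH).length ≤ zs.length := List.length_dropWhile_le ..
        rw [hdw] at h1
        simp at h1
        omega
      conv_lhs => rw [← hsplit, hdw]
      rw [List.foldl_append, pvFold_some _ d k hpre']
      rw [List.foldl_cons]
      have hstep : pvStepA (pvApply d k ((zs.takeWhile pvNH).filter pvValid), some k) h0
          = (pvApply d k ((zs.takeWhile pvNH).filter pvValid), some (pvKeyOf h0)) := by
        simp [pvStepA, hh]
      rw [hstep, ih r _ (pvKeyOf h0) hlen]
      have hdw2 : (h0 :: r).dropWhile pvNH = h0 :: r := by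
        rw [List.dropWhile_cons]
        simp [pvNH, hh]
      rw [pvSegRun_cons _ (h0 :: r) h0 r hdw2]

lemma pvMain_none (zs : List String) (d : PySem.Dict String (List String)) :
    (zs.foldl pvStepA (d, none)).1 = pvSegRun d zs := by
  have hsplit : zs.takeWhile pvNH ++ zs.dropWhile pvNH = zs := List.takeWhile_append_dropWhile
  have hpre' : ∀ l ∈ zs.takeWhile pvNH, pvHdr l = false := by
    intro l hlm
    have := List.mem_takeWhile_imp hlm
    simpa [pvNH] using this
  cases hdw : zs.dropWhile pvNH with
  | nil =>
    conv_lhs => rw [← hsplit, hdw]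
    rw [List.append_nil, pvFold_none _ d hpre']
    exact (pvSegRun_nil _ _ hdw).symm
  | cons h0 r =>
    have hh : pvHdr h0 = true := pv_head_dropWhile zs h0 r hdw
    conv_lhs => rw [← hsplit, hdw]
    rw [List.foldl_append, pvFold_none _ d hpre']
    rw [List.foldl_cons]
    have hstep : pvStepA (d, none) h0 = (d, some (pvKeyOf h0)) := by
      simp [pvStepA, hh]
    rw [hstep, pvMain_some r.length r d (pvKeyOf h0) le_rfl]
    rw [pvSegRun_cons d zs h0 r hdw]

-- header-position list of zs when enumerated from s
def pvH (s : Int) (zs : List String) : List Int :=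
  ((PySem.List.enumerate zs s).filter (fun p => pvHdr p.2)).map (fun p => p.1)

lemma pvH_nil_iff (zs : List String) (s : Int) :
    pvH s zs = [] ↔ ∀ l ∈ zs, pvHdr l = false := by
  induction zs generalizing s with
  | nil => simp [pvH, PySem.List.enumerate_nil]
  | cons a t ih =>
    unfold pvH
    rw [PySem.List.enumerate_cons, List.filter_cons]
    by_cases ha : pvHdr a = true
    · simp [ha]
    · have ha' : pvHdr a = false := by simpa using ha
      simp only [ha', Bool.false_eq_true, if_false]
      rw [List.forall_mem_cons]
      constructor
      · intro h1
        exact ⟨ha', (ih (s + 1)).mp h1⟩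
      · intro h1
        exact (ih (s + 1)).mpr h1.2

lemma pvH_decomp (pre : List String) (h0 : String) (rest : List String) (s : Int)
    (hpre : ∀ l ∈ pre, pvHdr l = false) (hh : pvHdr h0 = true) :
    pvH s (pre ++ h0 :: rest) = (s + pre.length) :: pvH (s + pre.length + 1) rest := by
  unfold pvH
  rw [PySem.List.enumerate_append, List.filter_append, List.map_append]
  have h1 : (PySem.List.enumerate pre s).filter (fun p => pvHdr p.2) = [] := by
    rw [List.filter_eq_nil_iff]
    intro p hp
    rcases (PySem.List.mem_enumerate_iff pre s p).mp hp with ⟨k, hk, rfl⟩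
    simp [hpre _ (List.getElem_mem hk)]
  rw [h1, PySem.List.enumerate_cons, List.filter_cons]
  simp [hh]

-- B's loop body is pvApply at the slice it reads
lemma pvStepB_eq (ys : List String) (d : PySem.Dict String (List String)) (pr : Int × Int) :
    pvStepB ys d pr = pvApply d (pvKeyOf (PySem.List.pyGetD ys pr.1 ""))
      ((PySem.List.slice ys (some (pr.1 + 1)) (some pr.2)).filter pvValid) := rfl

lemma pvBmain (ys : List String) : ∀ (n : Nat) (zs : List String) (c : Nat)
    (d : PySem.Dict String (List String)), zs.length ≤ n → zs = ys.drop c →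
    ((pvH (c : Int) zs).zip ((pvH (c : Int) zs).tail ++ [(ys.length : Int)])).foldl
        (pvStepB ys) d = pvSegRun d zs := by
  intro n
  induction n with
  | zero =>
    intro zs c d hn _
    have hz : zs = [] := List.eq_nil_of_length_eq_zero (Nat.le_zero.mp hn)
    subst hz
    simp [pvH, PySem.List.enumerate_nil, pvSegRun_nil]
  | succ n ih =>
    intro zs c d hn hzs2
    have hsplit : zs.takeWhile pvNH ++ zs.dropWhile pvNH = zs := List.takeWhile_append_dropWhile
    have hpre : ∀ l ∈ zs.takeWhile pvNH, pvHdr l = false := by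
      intro l hlm
      have := List.mem_takeWhile_imp hlm
      simpa [pvNH] using this
    cases hdw : zs.dropWhile pvNH with
    | nil =>
      have hall : ∀ l ∈ zs, pvHdr l = false := by
        intro l hl
        have h2 := List.dropWhile_eq_nil_iff.mp hdw l hl
        simpa [pvNH] using h2
      rw [(pvH_nil_iff zs (c : Int)).mpr hall]
      simp only [List.zip_nil_left, List.foldl_nil]
      exact (pvSegRun_nil d zs hdw).symm
    | cons h0 r =>
      have hzs : zs = zs.takeWhile pvNH ++ h0 :: r := by rw [← hdw, hsplit]
      have hh : pvHdr h0 = true := pv_head_dropWhile zs h0 r hdw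
      obtain ⟨p, hp⟩ : ∃ p, (zs.takeWhile pvNH).length = p := ⟨_, rfl⟩
      have hlenz : zs.length = ys.length - c := by rw [hzs2, List.length_drop]
      have hzlen : zs.length = p + (r.length + 1) := by
        have h4 := congrArg List.length hzs
        simp only [List.length_append, List.length_cons] at h4
        rw [hp] at h4
        omega
      have hcys : c + zs.length = ys.length := by
        have hle : c ≤ ys.length := by
          by_contra hcon
          have hys : ys.drop c = [] := List.drop_eq_nil_of_le (by omega)
          rw [hys] at hzs2
          rw [hzs2] at hzs
          exact absurd hzs (by simp)
        omega
      have hdecomp : pvH (c : Int) zs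
          = ((c : Int) + (p : Int)) :: pvH ((c : Int) + (p : Int) + 1) r := by
        conv_lhs => rw [hzs]
        rw [pvH_decomp _ h0 r _ hpre hh, hp]
      have hget : PySem.List.pyGetD ys ((c : Int) + (p : Int)) "" = h0 := by
        have hcast : ((c : Int) + (p : Int)) = ((c + p : Nat) : Int) := by push_cast; ring
        rw [hcast, PySem.List.pyGetD_natCast, List.getD_eq_getElem?_getD]
        have h1 : ys[c + p]? = some h0 := by
          have h2 : (ys.drop c)[p]? = ys[c + p]? := List.getElem?_drop ..
          rw [← h2, ← hzs2]
          conv_lhs => rw [hzs]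
          rw [List.getElem?_append_right (le_of_eq hp)]
          simp [hp]
        rw [h1]
        rfl
      have hdrop1 : ys.drop (c + p + 1) = r := by
        rw [show c + p + 1 = c + (p + 1) by omega, ← List.drop_drop, ← hzs2]
        conv_lhs => rw [hzs]
        rw [show zs.takeWhile pvNH ++ h0 :: r = (zs.takeWhile pvNH ++ [h0]) ++ r by simp]
        exact List.drop_left' (by simp [hp])
      cases hr2 : pvH ((c : Int) + (p : Int) + 1) r with
      | nil =>
        have hnor : ∀ l ∈ r, pvHdr l = false := (pvH_nil_iff r _).mp hr2
        rw [hdecomp, hr2]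
        simp only [List.tail_cons, List.nil_append, List.zip_cons_cons, List.zip_nil_left,
          List.foldl_cons, List.foldl_nil]
        have hslice : PySem.List.slice ys (some ((c : Int) + (p : Int) + 1))
            (some (ys.length : Int)) = r := by
          have hcast : ((c : Int) + (p : Int) + 1) = ((c + p + 1 : Nat) : Int) := by push_cast; ring
          rw [hcast, PySem.List.slice_natCast, hdrop1]
          apply List.take_of_length_le
          omega
        rw [pvStepB_eq, hget, hslice]
        rw [pvSegRun_cons d zs h0 r hdw]
        rw [List.takeWhile_eq_self_iff.mpr (by intro x hx; simp [pvNH, hnor x hx]),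
          List.dropWhile_eq_nil_iff.mpr (by intro x hx; simp [pvNH, hnor x hx])]
        exact (pvSegRun_nil _ _ rfl).symm
      | cons q t =>
        cases hdw2 : r.dropWhile pvNH with
        | nil =>
          exfalso
          have hnor : ∀ l ∈ r, pvHdr l = false := by
            intro l hl
            have h2 := List.dropWhile_eq_nil_iff.mp hdw2 l hl
            simpa [pvNH] using h2
          rw [(pvH_nil_iff r _).mpr hnor] at hr2
          cases hr2
        | cons h1 r1 =>
          have hh1 : pvHdr h1 = true := pv_head_dropWhile r h1 r1 hdw2
          have hrsplit : r = r.takeWhile pvNH ++ h1 :: r1 := by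
            rw [← hdw2, List.takeWhile_append_dropWhile]
          have htw : ∀ l ∈ r.takeWhile pvNH, pvHdr l = false := by
            intro l hlm
            have := List.mem_takeWhile_imp hlm
            simpa [pvNH] using this
          obtain ⟨w, hw⟩ : ∃ w, (r.takeWhile pvNH).length = w := ⟨_, rfl⟩
          have hdecr : pvH ((c : Int) + (p : Int) + 1) r
              = ((c : Int) + (p : Int) + 1 + (w : Int)) ::
                pvH ((c : Int) + (p : Int) + 1 + (w : Int) + 1) r1 := by
            conv_lhs => rw [hrsplit]
            rw [pvH_decomp _ h1 r1 _ htw hh1, hw]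
          rw [hr2] at hdecr
          injection hdecr with hq ht
          rw [hdecomp, hr2]
          simp only [List.tail_cons, List.cons_append, List.zip_cons_cons, List.foldl_cons]
          have hslice : PySem.List.slice ys (some ((c : Int) + (p : Int) + 1)) (some q)
              = r.takeWhile pvNH := by
            have hcast : ((c : Int) + (p : Int) + 1) = ((c + p + 1 : Nat) : Int) := by push_cast; ring
            have hcastq : q = ((c + p + 1 + w : Nat) : Int) := by rw [hq]; push_cast; ring
            rw [hcast, hcastq, PySem.List.slice_natCast, hdrop1]
            rw [show c + p + 1 + w - (c + p + 1) = w by omega]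
            conv_lhs => rw [hrsplit]
            exact List.take_left' hw
          rw [pvStepB_eq, hget, hslice]
          have hdrop2 : h1 :: r1 = ys.drop (c + p + 1 + w) := by
            rw [show c + p + 1 + w = (c + p + 1) + w by omega, ← List.drop_drop, hdrop1]
            conv_rhs => rw [hrsplit]
            exact (List.drop_left' hw).symm
          have hc' : q :: t = pvH (((c + p + 1 + w : Nat) : Int)) (h1 :: r1) := by
            have hd0 := pvH_decomp [] h1 r1 (((c + p + 1 + w : Nat) : Int))
              (by intro l hl; cases hl) hh1
            simp only [List.nil_append, List.length_nil, Nat.cast_zero, add_zero] at hd0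
            rw [hd0]
            have hcq : ((c + p + 1 + w : Nat) : Int) = (c : Int) + (p : Int) + 1 + (w : Int) := by
              push_cast; ring
            rw [hcq, hq, ht]
          have hlen1 : (h1 :: r1).length ≤ n := by
            have h4 := congrArg List.length hrsplit
            simp only [List.length_append, List.length_cons] at h4
            rw [hw] at h4
            simp only [List.length_cons]
            omega
          have hfin := ih (h1 :: r1) (c + p + 1 + w)
            (pvApply d (pvKeyOf h0) ((r.takeWhile pvNH).filter pvValid)) hlen1 hdrop2
          rw [← hc'] at hfin
          simp only [List.tail_cons] at hfin
          rw [hfin]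
          rw [pvSegRun_cons d zs h0 r hdw, hdw2]

-- ===== VERDICT (by name: the statement is the Claim_ definition above) =====
theorem extract_rack_number_spec : Claim_equal_extract_rack_number := by
  intro contents _hdom
  unfold Spec_extract_rack_number
  have h1 : extract_rack_number contents =
      (pvSegRun PySem.Dict.empty (contents.map PySem.Str.strip)).items := by
    unfold extract_rack_number
    rw [← List.foldl_map, pvMain_none]
  have h2 := congrArg PySem.Dict.items
    (pvBmain (contents.map PySem.Str.strip) (contents.map PySem.Str.strip).length
      (contents.map PySem.Str.strip) 0 PySem.Dict.empty le_rfl (by simp))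
  simp only [Nat.cast_zero] at h2
  rw [h1]
  exact h2.symm
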